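/- GENERATED by mk_final_copies.py from the proof of the farm's unit `start_decoder.F5f` (farm:start_decoder.F5f.1: Proof.lean) as the
   re-elaboration sweep compiled it — do not edit. -/
import Asan.CheckWalk
import Vorbis.Spec.Reader
import Vorbis.Spec.Units.start_decoder_F5f

open X86 X86.User Asan Vorbis Vorbis.Spec Vorbis.Spec.StartDecoder

set_option maxRecDepth 4000
set_option maxHeartbeats 4000000

namespace Vorbis.Spec.start_decoder_F5f

/-- **Segment F5f of `start_decoder`** (`cut218` 0x11567f … 0x1156c4, C lines 4010 – 4011): the result of get_bits spilled to
`[R+30H]`, the checked load of `values`, the checked word store `Xlist[values] = (uint16) result`, `++values`, `++k`; exit at the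
head of loop 4009 (`F5After.next_inner`). -/
theorem f5f_walk {Lay : Layout} (hLay : Lay.hi = 0x1000000) {μ : Microarch} (hμ : UserX.MicroOK μ) {u₀ : State}
    (hcode : HasCodeNat Lay u₀ Vorbis.L.start_decoder.entry Vorbis.Code.code_start_decoder.nat Vorbis.L.start_decoder.size)
    (hst2 : Asan.SmallCheck Lay μ Vorbis.WayInv (Vorbis.CodeOK u₀) [.rax, .rcx, .rdx] 2 Vorbis.L.__asan_store2_noabort.entry)
    (hld4 : Asan.SmallCheck Lay μ Vorbis.WayInv (Vorbis.CodeOK u₀) [.rax, .rcx, .rdx] 4 Vorbis.L.__asan_load4_noabort.entry)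
    {g : Ghost} {i : Nat} {A5 : Arena} {A : Arena × List Obj} {mc : Int} {n P j c d k : Nat} {v : State}
    (hat : F5After u₀ g i A5 A mc n P j c d k v) :
    ReachVia Lay μ WayInv v (fun w => F5Inner u₀ g i A5 A mc n P j c d (k + 1) Vorbis.L.start_decoder.cut219 w) := by
  have hi := hat.inner
  have hb := hi.part.in5
  have hf := hb.loop.frame
  have he := hf.entry
  v_entry he
  obtain ⟨r8, rlo, rhi, ra, flo, fhi, fstack, farena, flog, fc1, fc64, ilt, gdef, blo, bhi, btext, bstack, bdata, blog⟩ := hb.geo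
  have hP31 : Floor1.partitions v.mem (floorAt g v.mem i) ≤ 31 := hb.cur.base.FL4
  have hjlt := hi.j_lt
  rw [← hi.part.parts] at hjlt
  have hsum := hb.dimSum_le (Nat.le_of_lt hjlt)
  have hd8 := hi.d_le
  have hklt := hat.k_lt
  -- `m` = the old `values`, the index of the `Xlist` entry that is stored
  obtain ⟨m, hm⟩ : ∃ m, m = 2 + Floor1.dimSum v.mem (floorAt g v.mem i) j + k := ⟨_, rfl⟩
  have hm249 : m ≤ 249 := by omega
  have hm2 : 2 ≤ m := by omega
  have hvals := hi.values
  rw [← hm] at hvals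
  have hrb15 := hi.xl.rb
  obtain ⟨z, c_rax⟩ : ∃ z, v.reg .rax = UInt64.ofNat z ∧ z < 2 ^ Floor1.rangebits v.mem (floorAt g v.mem i) :=
    ⟨_, (UInt64.ofNat_toNat).symm, hat.rax⟩
  obtain ⟨c_rax, hz⟩ := c_rax
  have hz15 : z < 32768 := by
    have h1 : 2 ^ Floor1.rangebits v.mem (floorAt g v.mem i) ≤ 2 ^ 15 := Nat.pow_le_pow_right (by omega) hrb15
    omega
  have hsitev := hb.site 0x638 4 (by omega) (by simp only [voff]; omega)
  have hsitex := hb.site (0x152 + 2 * m) 2 (by omega) (by simp only [voff]; omega)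
  -- the three addresses as numbers (the walker sees `UInt64.ofNat R`, not `addr g.R`)
  obtain ⟨R, hR⟩ : ∃ R, R = g.R := ⟨_, rfl⟩
  obtain ⟨f, hfe⟩ : ∃ f, f = g.f := ⟨_, rfl⟩
  obtain ⟨gi, hgi⟩ : ∃ gi, gi = floorAt g v.mem i := ⟨_, rfl⟩
  have c_rip := hf.rip
  have c_rsp := hf.rsp
  have c_rbp := hb.loop.rbp
  have c_rbx := hb.rbx
  have c_r13 : v.reg .r13 = UInt64.ofNat j := hi.part.r13
  have c_r15 : v.reg .r15 = UInt64.ofNat k := hi.r15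
  rw [← hR] at c_rsp r8 rlo rhi ra fstack
  rw [← hfe] at c_rbp flo fhi fstack farena flog
  rw [← hgi] at c_rbx gdef hsitev hsitex hvals
  simp only [addr] at c_rsp c_rbp c_rbx
  have c_eq : Mem.EqOn Vorbis.L.textLo Vorbis.L.textHi u₀.mem v.mem := hf.code
  have hdf : v.flags .df = false := (show abiInv _ from hf.inv).1
  have hmx : v.mxcsr &&& 0x1F80 = 0x1F80 := (show abiInv _ from hf.inv).2
  have hsse := Vorbis.sseOK_of_abiInv hf.inv
  have hgw : 0x119d40 ≤ gi ∧ gi + 1596 ≤ 0xC00000 ∧ (gi + 1596 ≤ 0x700000 ∨ 0x800000 ≤ gi) := by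
    omega
  have hgf : gi + 1596 ≤ f ∨ f + 1808 ≤ gi := by
    omega
  clear fc1 fc64 ilt gdef blo bhi btext bstack bdata blog hsum hjlt hP31
  -- the load of the piece, named before the walk: `values`
  have hvl : v.mem.readLE (UInt64.ofNat gi + 1592) 4 = m := by
    have ea : addr (gi + 1592) = UInt64.ofNat gi + 1592 := by
      apply UInt64.toNat_inj.mp
      rw [toNat_addr _ (by omega)]
      u_omega
    have h0 : (0 : Int) ≤ v.mem.i32 (gi + 1592) := by
      have h := hvals
      simp only [vacc, voff] at h
      rw [h]
      omega
    have h1 := Mem.u32_of_i32_nonneg v.mem (gi + 1592) h0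
    have h2 := hvals
    simp only [vacc, voff] at h2
    rw [h2] at h1
    unfold Mem.u32 at h1
    rw [ea] at h1
    rw [h1]
    omega
  -- the spilled result read back as a word (`mov [rsp+0x30], eax … movzx eax, word [rsp+0x30]`), and the word that is stored
  have hsp : (v.mem.writeLE (UInt64.ofNat R + 48) 4 (Word.part Width.w32 (UInt64.ofNat z)).toNat).readLE
      (UInt64.ofNat R + 48) 2 = z := by
    rw [Mem.readLE_prefix _ _ 2 2, Mem.readLE_writeLE_same _ _ 4 _ (by decide), Vorbis.Spec.cnt32_part_toNat z (by omega)]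
    omega
  have hx16 : (BitVec.setWidth 16 (BitVec.zeroExtend 32 (BitVec.ofNat 16 z))).toNat = z := by
    simp only [BitVec.truncate_eq_setWidth, BitVec.toNat_setWidth, BitVec.toNat_ofNat]
    omega
  have hm1 : (BitVec.ofNat 32 m + 1#32).toNat = m + 1 := by
    simp only [BitVec.toNat_add, BitVec.toNat_ofNat, BitVec.toNat_ofNat]
    omega
  u_walk hcode [hμ.vendor, Vorbis.Spec.cnt32_part k, Vorbis.Spec.cnt32_part m, Vorbis.Spec.cnt32_sext_bv m (by omega), hsp, hx16, hm1]
    until [Vorbis.L.start_decoder.cut219] span [Vorbis.L.textLo, Vorbis.L.textHi] side (v_side)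
  case check_11568a =>
    -- the dword `values`
    have hun : ShadowUntouched v.mem s_11568a.mem := by v_untouched
    exact Vorbis.Spec.check_site hf.shadow hun hsitev (by u_omega)
  case check_1156a9 =>
    -- the word `Xlist[values]`, `values ≤ 249`
    have hun : ShadowUntouched v.mem s_1156a9.mem := by v_untouched
    exact Vorbis.Spec.check_site hf.shadow hun hsitex (by u_omega)
  · -- the head of loop 4009 (0x1156c8) with `k + 1`
    have tA : (UInt64.ofNat gi + (UInt64.ofNat m + 168) * 2 + 2).toNat = gi + 338 + 2 * m := by u_omega
    have eA : UInt64.ofNat gi + (UInt64.ofNat m + 168) * 2 + 2 = addr (gi + 338 + 2 * m) := by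
      apply UInt64.toNat_inj.mp
      rw [tA, toNat_addr _ (by omega)]
    have eV : UInt64.ofNat gi + 1592 = addr (gi + 1592) := by
      apply UInt64.toNat_inj.mp
      rw [toNat_addr _ (by omega)]
      u_omega
    have hun : ShadowUntouched v.mem s_1156c4.mem := by v_untouched
    have hsame : Mem.SameExcept [⟨R - 408, R⟩, ⟨R + 0x30, R + 0x34⟩, ⟨gi + 338 + 2 * m, gi + 340 + 2 * m⟩,
        ⟨gi + 0x638, gi + 0x63c⟩] v.mem s_1156c4.mem := by
      u_same
    have hws : ∀ w, w ∈ ([⟨R - 408, R⟩, ⟨R + 0x30, R + 0x34⟩, ⟨gi + 338 + 2 * m, gi + 340 + 2 * m⟩,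
        ⟨gi + 0x638, gi + 0x63c⟩] : List Span) → Floor.Quiet g (floorAt g v.mem i) 0x152 0x63c w := by
      intro w hw
      simp only [List.mem_cons, List.mem_nil_iff, or_false] at hw
      unfold Floor.Quiet
      rw [← hR, ← hgi]
      rcases hw with rfl | rfl | rfl | rfl
      all_goals simp only []
      all_goals omega
    have hbits : Bits (g.Blk A) g.len s_1156c4.mem g.f :=
      Floor.bits_quiet hb.geo hb.loop.mid.bits hsame hws (by omega)
    have hinv : abiInv s_1156c4 := by
      refine Vorbis.abiInv_of ?_ ?_
      · rw [w_flags]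
        simp only [X86.User.df_setStatus]
        exact w_df_1156a9
      · rw [w_mxcsr]
        exact hmx
    have e1 : s_1156c4.reg .rsp = addr g.R := by
      rw [w_rsp, hR]
      rfl
    have e2 : s_1156c4.reg .rbp = addr g.f := by
      rw [w_kept .rbp rfl, c_rbp, hfe]
      rfl
    have e3 : s_1156c4.reg .rbx = addr (floorAt g v.mem i) := by
      rw [w_kept .rbx rfl, c_rbx, hgi]
      rfl
    have e4 : s_1156c4.reg .r13 = addr j := by
      rw [w_kept .r13 rfl, c_r13]
      rfl
    have e5 : s_1156c4.reg .r15 = addr (k + 1) := by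
      rw [w_r15, ← Vorbis.Spec.cnt32_part k, Vorbis.Spec.cnt32_succ k (by omega)]
      rfl
    have hin := hb.keep w_rip e1 e2 e3 hinv w_eq hsame (fun w hw => (hws w hw).win) (by omega) (by omega) (by omega) hun
      hbits
    obtain ⟨eG, _, _, _⟩ := Floor.fields_same hb.geo hsame (fun w hw => (hws w hw).win) (by omega)
    -- what the element still reads the same: below `Xlist[m]`, and from `Xlist[m+1]` up to `values`
    have hlow : Mem.EqOn gi (gi + 0x152 + 2 * m) v.mem s_1156c4.mem := by
      apply hsame.eqOn
      intro w hw
      simp only [List.mem_cons, List.mem_nil_iff, or_false] at hw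
      rcases hw with rfl | rfl | rfl | rfl
      all_goals simp only []
      all_goals omega
    have hhigh : Mem.EqOn (gi + 0x154 + 2 * m) (gi + 0x638) v.mem s_1156c4.mem := by
      apply hsame.eqOn
      intro w hw
      simp only [List.mem_cons, List.mem_nil_iff, or_false] at hw
      rcases hw with rfl | rfl | rfl | rfl
      all_goals simp only []
      all_goals omega
    have hslotE : Mem.EqOn (R + 0x38) (R + 0x3c) v.mem s_1156c4.mem := by
      apply hsame.eqOn
      intro w hw
      simp only [List.mem_cons, List.mem_nil_iff, or_false] at hw
      rcases hw with rfl | rfl | rfl | rfl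
      all_goals simp only []
      all_goals omega
    have hslot : StartDecoder.slot g s_1156c4.mem 0x38 = c := by
      have e : StartDecoder.slot g s_1156c4.mem 0x38 = StartDecoder.slot g v.mem 0x38 := by
        unfold StartDecoder.slot
        rw [← hR]
        exact hslotE.u32 _ (by omega) (by omega) (by omega)
      rw [e]
      exact hi.slot_c
    -- the new entry and the new count, read back
    have hxv : Floor1.Xlist s_1156c4.mem gi m = z := by
      simp only [vacc, voff]
      unfold Mem.u16
      rw [w_mem, eA, eV]
      rw [Mem.readLE_writeLE_disjoint_noWrap _ _ 4 _ _ 2 (by unfold Mem.NoWrap; rw [toNat_addr _ (by omega)]; omega)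
        (by unfold Mem.NoWrap; rw [toNat_addr _ (by omega)]; omega)
        (by rw [toNat_addr _ (by omega), toNat_addr _ (by omega)]; omega)]
      rw [Mem.readLE_writeLE_same _ _ 2 _ (by decide)]
      omega
    have hvv : Floor1.values s_1156c4.mem gi = ((m + 1 : Nat) : Int) := by
      simp only [vacc, voff]
      rw [w_mem, eV, Mem.i32_writeLE_same]
      rcases sint32_cases ((m + 1) % 2 ^ 32) with ⟨c1, c2⟩ | ⟨c1, c2⟩
      · rw [c2]
        omega
      · omega
    rw [hgi] at hlow hhigh hxv hvv
    refine ReachVia.done (hat.next_inner hin eG hm hlow hhigh (by rw [← hgi]; omega) ?_ hvv e4 e5 hslot)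
    rw [hxv]
    exact hz

end Vorbis.Spec.start_decoder_F5f

/-- Unit `start_decoder.F5f`: `f5f_walk` at every entry state. -/
theorem Vorbis.Spec.Worked.start_decoder_F5f_ok : Vorbis.Spec.start_decoder_F5f.Statement := by
  intro Lay hLay μ hμ u₀ hcode hst2 hld4 g i A5 A mc n P j c d k v hat
  exact Vorbis.Spec.start_decoder_F5f.f5f_walk hLay hμ hcode hst2 hld4 hat
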